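-- pv_equiv track=rewrite | github.com/lilpostloo/Challenge374 | nanosolvernotes.py | getSegmentCount
-- ===== SOURCE A (Python) =====
-- def getSegmentCount(arr):
--     count = 0
--     marker = 0
--     for x in arr:
--         if x == 1:
--             count += 1 if marker==0 else 0
--             marker=1
--         else:
--             marker=0
--     return count if marker==1 else count+1
-- ===== SOURCE B (Python) =====
-- def getSegmentCount(arr):
--     # Stage 1: run-length encode the input into maximal runs of equal values.
--     runs = []
--     for x in arr:
--         if runs and runs[-1][0] == x:
--             runs[-1][1] += 1
--         else:
--             runs.append([x, 1])
--     # Stage 2: count the runs whose value is 1.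
--     count = sum(1 for v, _ in runs if v == 1)
--     # Trailing adjustment exactly as A's: +1 unless the final run is a run of 1s.
--     return count if runs and runs[-1][0] == 1 else count + 1
-- ===== Notes on version B (the rewrite author's own statement) =====
-- stated objective: alternative
-- what changed: Replaces A's single stateful marker loop by a staged run-length-encoding pass: first build the list of maximal runs of equal values, then count the runs whose value is 1 and apply the trailing +1 adjustment by inspecting the last run.
import Mathlib
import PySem

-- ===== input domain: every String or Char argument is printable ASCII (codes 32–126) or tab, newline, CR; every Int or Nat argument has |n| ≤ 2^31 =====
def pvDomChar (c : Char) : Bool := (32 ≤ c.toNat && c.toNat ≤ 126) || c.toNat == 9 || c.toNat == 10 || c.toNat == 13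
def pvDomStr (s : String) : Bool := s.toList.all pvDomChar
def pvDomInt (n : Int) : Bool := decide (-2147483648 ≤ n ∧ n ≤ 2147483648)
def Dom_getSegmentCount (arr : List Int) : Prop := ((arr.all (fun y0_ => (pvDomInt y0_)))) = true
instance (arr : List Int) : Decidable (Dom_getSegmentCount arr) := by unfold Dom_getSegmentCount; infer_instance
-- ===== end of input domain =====

-- B replaces A's stateful marker loop by a staged run-length-encoding pass (alternative decomposition, same cost).


-- ===== PORT A =====
-- literal transliteration: fold carrying (count, marker)
def getSegmentCount (arr : List Int) : Int :=
  let s := arr.foldl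
    (fun (st : Int × Int) x =>
      if x == 1 then (st.1 + (if st.2 == 0 then 1 else 0), 1)
      else (st.1, 0))
    (0, 0)
  if s.2 == 1 then s.1 else s.1 + 1

-- ===== PORT B =====
-- transliteration of Source B; the run list is held most-recent-run first (head = Python's runs[-1]),
-- since Python's in-place "runs[-1][1] += 1 / runs.append" acts on the last run; run order does not affect countP
def getSegmentCount_alt (arr : List Int) : Int :=
  let runs := arr.foldl
    (fun (rs : List (Int × Int)) x =>
      match rs with
      | (v, c) :: t => if v == x then (v, c + 1) :: t else (x, 1) :: (v, c) :: t
      | [] => [(x, 1)])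
    []
  let count : Int := (runs.countP (fun p => p.1 == 1) : Nat)
  match runs with
  | (v, _) :: _ => if v == 1 then count else count + 1
  | [] => count + 1

-- ===== PRECONDITION & SPEC =====
def Spec_getSegmentCount (arr : List Int) (out : Int) : Prop := out = getSegmentCount_alt arr
instance (arr : List Int) (out : Int) : Decidable (Spec_getSegmentCount arr out) := by unfold Spec_getSegmentCount; infer_instance

-- ===== CLAIM (what is proved, stated in full; the proofs are below) =====
def Claim_equal_getSegmentCount : Prop := ∀ (arr : List Int), Dom_getSegmentCount arr → Spec_getSegmentCount arr (getSegmentCount arr)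

-- ===== LEMMAS AND PROOFS =====

-- A's marker, read off B's run list: 1 iff the most recent run is a run of 1s
def pvMark (rs : List (Int × Int)) : Int :=
  match rs with
  | (v, _) :: _ => if v == 1 then 1 else 0
  | [] => 0

def pvStepA (st : Int × Int) (x : Int) : Int × Int :=
  if x == 1 then (st.1 + (if st.2 == 0 then 1 else 0), 1) else (st.1, 0)

def pvStepB (rs : List (Int × Int)) (x : Int) : List (Int × Int) :=
  match rs with
  | (v, c) :: t => if v == x then (v, c + 1) :: t else (x, 1) :: (v, c) :: t
  | [] => [(x, 1)]

-- one step preserves the simulation between A's (count, marker) and B's run list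
theorem pv_step (rs : List (Int × Int)) (x : Int) :
    pvStepA (((rs.countP (fun p => p.1 == 1) : Nat) : Int), pvMark rs) x
    = ((((pvStepB rs x).countP (fun p => p.1 == 1) : Nat) : Int), pvMark (pvStepB rs x)) := by
  cases rs with
  | nil => by_cases hx : x = 1 <;> simp [pvStepA, pvStepB, pvMark, hx]
  | cons h t =>
    obtain ⟨v, c⟩ := h
    by_cases hx : x = 1 <;> by_cases hv : v = x <;>
      simp [pvStepA, pvStepB, pvMark, hx, hv, List.countP_cons] <;>
      first
      | (subst hv; simp [hx] at *)
      | simp [show ¬ v = 1 by omega]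
    all_goals omega

-- loop invariant: A's fold equals (countP, mark) of B's fold
theorem pv_loop (l : List Int) (rs : List (Int × Int)) :
    l.foldl pvStepA (((rs.countP (fun p => p.1 == 1) : Nat) : Int), pvMark rs)
    = ((((l.foldl pvStepB rs).countP (fun p => p.1 == 1) : Nat) : Int), pvMark (l.foldl pvStepB rs)) := by
  induction l generalizing rs with
  | nil => simp
  | cons x xs ih =>
    rw [List.foldl_cons, List.foldl_cons, pv_step rs x, ih (pvStepB rs x)]

-- ===== VERDICT (by name: the statement is the Claim_ definition above) =====
theorem getSegmentCount_spec : Claim_equal_getSegmentCount := by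
  intro arr _
  unfold Spec_getSegmentCount getSegmentCount getSegmentCount_alt
  simp only [show (fun (rs : List (Int × Int)) (x : Int) =>
      match rs with
      | (v, c) :: t => if v == x then (v, c + 1) :: t else (x, 1) :: (v, c) :: t
      | [] => [(x, 1)]) = pvStepB from rfl,
    show (fun (st : Int × Int) (x : Int) =>
      if x == 1 then (st.1 + (if st.2 == 0 then 1 else 0), 1) else (st.1, 0)) = pvStepA from rfl]
  have h := pv_loop arr []
  simp only [List.countP_nil, Nat.cast_zero, pvMark] at h
  rw [h]
  cases hr : arr.foldl pvStepB [] with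
  | nil => simp [pvMark, hr]
  | cons p t =>
    obtain ⟨v, c⟩ := p
    by_cases hv : v = 1 <;> simp [pvMark, hr, hv]
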